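-- pv_equiv track=rewrite | github.com/cmalkan/OTSniffer | shodan_integration.py | _score_exposure
-- ===== SOURCE A (Python) =====
-- HIGH_PORTS = {22, 23, 3389}
--
-- MEDIUM_WEB_PORTS = {80, 443, 8080, 8443}
--
-- def _score_exposure(open_ports: list[int], services: list[str]) -> tuple[str, int]:
--     ports = set(open_ports)
--     services_lower = {s.lower() for s in services}
--     if ports & HIGH_PORTS or services_lower & {"rdp", "ssh", "telnet"}:
--         return "high", 85
--     if ports & MEDIUM_WEB_PORTS or services_lower & {"http", "https"}:
--         return "medium", 55
--     return "low", 20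
-- ===== SOURCE B (Python) =====
-- HIGH_PORTS = {22, 23, 3389}
--
-- MEDIUM_WEB_PORTS = {80, 443, 8080, 8443}
--
--
-- def _severity_port(p):
--     if p in (22, 23, 3389):
--         return 2
--     if p in (80, 443, 8080, 8443):
--         return 1
--     return 0
--
--
-- def _severity_service(s):
--     t = s.lower()
--     if t in ("rdp", "ssh", "telnet"):
--         return 2
--     if t in ("http", "https"):
--         return 1
--     return 0
--
--
-- def _score_exposure(open_ports: list[int], services: list[str]) -> tuple[str, int]:
--     level = 0
--     for p in open_ports:
--         level = max(level, _severity_port(p))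
--     for s in services:
--         level = max(level, _severity_service(s))
--     if level == 2:
--         return "high", 85
--     if level == 1:
--         return "medium", 55
--     return "low", 20
-- ===== Notes on version B (the rewrite author's own statement) =====
-- stated objective: alternative
-- what changed: Replaces the two prioritized set-intersection early returns with a single pass computing the maximum per-element severity level (0/1/2) over all ports and services, then maps that maximum to the (label, score) pair.
import Mathlib
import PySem

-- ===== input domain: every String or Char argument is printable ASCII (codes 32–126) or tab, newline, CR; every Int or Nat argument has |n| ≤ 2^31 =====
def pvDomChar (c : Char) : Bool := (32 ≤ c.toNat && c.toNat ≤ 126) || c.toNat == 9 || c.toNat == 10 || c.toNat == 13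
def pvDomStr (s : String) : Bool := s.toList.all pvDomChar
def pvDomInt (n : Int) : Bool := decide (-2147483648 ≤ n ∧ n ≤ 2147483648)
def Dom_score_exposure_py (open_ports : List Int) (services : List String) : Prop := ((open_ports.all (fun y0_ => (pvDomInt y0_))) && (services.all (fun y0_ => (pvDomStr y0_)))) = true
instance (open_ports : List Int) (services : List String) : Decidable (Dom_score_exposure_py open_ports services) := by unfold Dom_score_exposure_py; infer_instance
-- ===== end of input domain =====

-- B is an alternative decomposition: one pass computing the maximum per-element severity, then a final lookup; return values proved identical on all inputs.

-- ===== PORT A =====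
def HIGH_PORTS : PySem.Set Int := PySem.Set.ofList [22, 23, 3389]

def MEDIUM_WEB_PORTS : PySem.Set Int := PySem.Set.ofList [80, 443, 8080, 8443]

def score_exposure_py (open_ports : List Int) (services : List String) : String × Int :=
  let ports : PySem.Set Int := PySem.Set.ofList open_ports
  let services_lower : PySem.Set String := PySem.Set.ofList (services.map PySem.Str.lower)
  if PySem.Set.inter ports HIGH_PORTS ≠ [] ∨
     PySem.Set.inter services_lower (PySem.Set.ofList ["rdp", "ssh", "telnet"]) ≠ [] then
    ("high", 85)
  else if PySem.Set.inter ports MEDIUM_WEB_PORTS ≠ [] ∨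
     PySem.Set.inter services_lower (PySem.Set.ofList ["http", "https"]) ≠ [] then
    ("medium", 55)
  else
    ("low", 20)

-- ===== PORT B =====
def severity_port (p : Int) : Int :=
  if p = 22 ∨ p = 23 ∨ p = 3389 then 2
  else if p = 80 ∨ p = 443 ∨ p = 8080 ∨ p = 8443 then 1
  else 0

def severity_service (s : String) : Int :=
  let t := PySem.Str.lower s
  if t = "rdp" ∨ t = "ssh" ∨ t = "telnet" then 2
  else if t = "http" ∨ t = "https" then 1
  else 0

def score_exposure_py_alt (open_ports : List Int) (services : List String) : String × Int :=
  let level0 : Int := 0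
  let level1 := open_ports.foldl (fun m p => max m (severity_port p)) level0
  let level := services.foldl (fun m s => max m (severity_service s)) level1
  if level = 2 then ("high", 85)
  else if level = 1 then ("medium", 55)
  else ("low", 20)

-- ===== PRECONDITION & SPEC =====
def Spec_score_exposure_py (open_ports : List Int) (services : List String) (out : String × Int) : Prop := out = score_exposure_py_alt open_ports services
instance (open_ports : List Int) (services : List String) (out : String × Int) : Decidable (Spec_score_exposure_py open_ports services out) := by unfold Spec_score_exposure_py; infer_instance

-- ===== CLAIM (what is proved, stated in full; the proofs are below) =====
def Claim_equal_score_exposure_py : Prop := ∀ (open_ports : List Int) (services : List String), Dom_score_exposure_py open_ports services → Spec_score_exposure_py open_ports services (score_exposure_py open_ports services)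

-- ===== LEMMAS AND PROOFS =====

-- threshold characterisation of the running maximum
theorem le_foldl_max_iff {α : Type} (f : α → Int) (c : Int) :
    ∀ (l : List α) (a : Int),
      c ≤ l.foldl (fun m x => max m (f x)) a ↔ c ≤ a ∨ ∃ x ∈ l, c ≤ f x := by
  intro l
  induction l with
  | nil => intro a; simp
  | cons x xs ih =>
    intro a
    simp only [List.foldl_cons, ih, le_max_iff, List.mem_cons]
    constructor
    · rintro ((h | h) | ⟨y, hy, hcy⟩)
      · exact Or.inl h
      · exact Or.inr ⟨x, Or.inl rfl, h⟩
      · exact Or.inr ⟨y, Or.inr hy, hcy⟩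
    · rintro (h | ⟨y, (rfl | hy), hcy⟩)
      · exact Or.inl (Or.inl h)
      · exact Or.inl (Or.inr hcy)
      · exact Or.inr ⟨y, hy, hcy⟩

theorem foldl_max_le {α : Type} (f : α → Int) (c : Int) (hf : ∀ x, f x ≤ c) :
    ∀ (l : List α) (a : Int), a ≤ c → l.foldl (fun m x => max m (f x)) a ≤ c := by
  intro l
  induction l with
  | nil => intro a h; simpa using h
  | cons x xs ih =>
    intro a h
    exact ih _ (max_le h (hf x))

theorem severity_port_le (p : Int) : severity_port p ≤ 2 := by
  unfold severity_port; split_ifs <;> norm_num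

theorem severity_service_le (s : String) : severity_service s ≤ 2 := by
  simp only [severity_service]; split_ifs <;> norm_num

theorem inter_ofList_ne_nil {α : Type} [DecidableEq α] (xs : List α) (t : PySem.Set α) :
    PySem.Set.inter (PySem.Set.ofList xs) t ≠ [] ↔ ∃ x ∈ xs, x ∈ t := by
  rw [← List.isEmpty_eq_false_iff, List.isEmpty_eq_false_iff_exists_mem]
  constructor
  · rintro ⟨y, hy⟩
    rw [PySem.Set.mem_inter] at hy
    exact ⟨y, (PySem.Set.mem_ofList _ _).1 hy.1, hy.2⟩
  · rintro ⟨y, hy, hyt⟩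
    exact ⟨y, (PySem.Set.mem_inter _ _ _).2 ⟨(PySem.Set.mem_ofList _ _).2 hy, hyt⟩⟩

theorem two_le_sev_port (p : Int) : 2 ≤ severity_port p ↔ p ∈ HIGH_PORTS := by
  unfold severity_port HIGH_PORTS
  split_ifs with h1 h2 <;> simp_all

theorem one_le_sev_port (p : Int) : 1 ≤ severity_port p ↔ p ∈ HIGH_PORTS ∨ p ∈ MEDIUM_WEB_PORTS := by
  unfold severity_port HIGH_PORTS MEDIUM_WEB_PORTS
  split_ifs with h1 h2 <;> simp_all

theorem two_le_sev_service (s : String) :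
    2 ≤ severity_service s ↔ PySem.Str.lower s ∈ (["rdp", "ssh", "telnet"] : List String) := by
  simp only [severity_service]
  split_ifs with h1 h2 <;> simp_all

theorem one_le_sev_service (s : String) :
    1 ≤ severity_service s ↔
      PySem.Str.lower s ∈ (["rdp", "ssh", "telnet"] : List String) ∨
      PySem.Str.lower s ∈ (["http", "https"] : List String) := by
  simp only [severity_service]
  split_ifs with h1 h2 <;> simp_all

-- ===== VERDICT (by name: the statement is the Claim_ definition above) =====
theorem score_exposure_py_spec : Claim_equal_score_exposure_py := by
  intro open_ports services _
  unfold Spec_score_exposure_py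
  simp only [score_exposure_py, score_exposure_py_alt]
  generalize hL : services.foldl (fun m s => max m (severity_service s))
      (open_ports.foldl (fun m p => max m (severity_port p)) 0) = L
  have hub : L ≤ 2 := by
    rw [← hL]
    exact foldl_max_le _ _ severity_service_le _ _
      (foldl_max_le _ _ severity_port_le _ _ (by norm_num))
  have hhigh : 2 ≤ L ↔
      (PySem.Set.inter (PySem.Set.ofList open_ports) HIGH_PORTS ≠ [] ∨
       PySem.Set.inter (PySem.Set.ofList (services.map PySem.Str.lower))
         (PySem.Set.ofList ["rdp", "ssh", "telnet"]) ≠ []) := by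
    rw [← hL, le_foldl_max_iff, le_foldl_max_iff, inter_ofList_ne_nil, inter_ofList_ne_nil]
    simp only [two_le_sev_port, two_le_sev_service, List.mem_map, PySem.Set.mem_ofList]
    constructor
    · rintro ((h | ⟨p, hp, hph⟩) | ⟨s, hs, hsl⟩)
      · norm_num at h
      · exact Or.inl ⟨p, hp, hph⟩
      · exact Or.inr ⟨_, ⟨s, hs, rfl⟩, hsl⟩
    · rintro (⟨p, hp, hph⟩ | ⟨_, ⟨s, hs, rfl⟩, hsl⟩)
      · exact Or.inl (Or.inr ⟨p, hp, hph⟩)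
      · exact Or.inr ⟨s, hs, hsl⟩
  have hone : 1 ≤ L ↔
      ((PySem.Set.inter (PySem.Set.ofList open_ports) HIGH_PORTS ≠ [] ∨
        PySem.Set.inter (PySem.Set.ofList (services.map PySem.Str.lower))
          (PySem.Set.ofList ["rdp", "ssh", "telnet"]) ≠ []) ∨
       (PySem.Set.inter (PySem.Set.ofList open_ports) MEDIUM_WEB_PORTS ≠ [] ∨
        PySem.Set.inter (PySem.Set.ofList (services.map PySem.Str.lower))
          (PySem.Set.ofList ["http", "https"]) ≠ [])) := by
    rw [← hL, le_foldl_max_iff, le_foldl_max_iff]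
    rw [inter_ofList_ne_nil, inter_ofList_ne_nil, inter_ofList_ne_nil, inter_ofList_ne_nil]
    simp only [one_le_sev_port, one_le_sev_service, List.mem_map, PySem.Set.mem_ofList]
    constructor
    · rintro ((h | ⟨p, hp, hph | hpm⟩) | ⟨s, hs, hsl | hsm⟩)
      · norm_num at h
      · exact Or.inl (Or.inl ⟨p, hp, hph⟩)
      · exact Or.inr (Or.inl ⟨p, hp, hpm⟩)
      · exact Or.inl (Or.inr ⟨_, ⟨s, hs, rfl⟩, hsl⟩)
      · exact Or.inr (Or.inr ⟨_, ⟨s, hs, rfl⟩, hsm⟩)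
    · rintro ((⟨p, hp, hph⟩ | ⟨_, ⟨s, hs, rfl⟩, hsl⟩) | (⟨p, hp, hpm⟩ | ⟨_, ⟨s, hs, rfl⟩, hsm⟩))
      · exact Or.inl (Or.inr ⟨p, hp, Or.inl hph⟩)
      · exact Or.inr ⟨s, hs, Or.inl hsl⟩
      · exact Or.inl (Or.inr ⟨p, hp, Or.inr hpm⟩)
      · exact Or.inr ⟨s, hs, Or.inr hsm⟩
  by_cases hP : PySem.Set.inter (PySem.Set.ofList open_ports) HIGH_PORTS ≠ [] ∨
      PySem.Set.inter (PySem.Set.ofList (services.map PySem.Str.lower))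
        (PySem.Set.ofList ["rdp", "ssh", "telnet"]) ≠ []
  · have h2 : L = 2 := le_antisymm hub (hhigh.2 hP)
    rw [if_pos hP, if_pos h2]
  · by_cases hQ : PySem.Set.inter (PySem.Set.ofList open_ports) MEDIUM_WEB_PORTS ≠ [] ∨
        PySem.Set.inter (PySem.Set.ofList (services.map PySem.Str.lower))
          (PySem.Set.ofList ["http", "https"]) ≠ []
    · have hge1 : 1 ≤ L := hone.2 (Or.inr hQ)
      have hne2 : L ≠ 2 := fun h => hP (hhigh.1 (by omega))
      have h1 : L = 1 := by omega
      rw [if_neg hP, if_pos hQ, if_neg hne2, if_pos h1]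
    · have h0 : ¬ 1 ≤ L := fun h => ((hone.1 h).elim hP hQ)
      rw [if_neg hP, if_neg hQ, if_neg (show L ≠ 2 by omega), if_neg (show L ≠ 1 by omega)]
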